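-- pv_equiv track=rewrite | github.com/UCSF-DataSci/05-first-exam-muhchellee | bioinformatics_project/scripts/find_cutsites.py | find_cut_sites
-- ===== SOURCE A (Python) =====
-- def find_cut_sites(dna_sequence, cut_site):
--     # removing and identifying | character from cut site
--     cut_site_length = cut_site.replace('|', '')
--     cut_position = cut_site.index('|')
--
--     positions = []
--     start = 0
--
--     # search for cut site in sequence
--     while True:
--         start = dna_sequence.find(cut_site.replace('|', ''), start)
--
--         if start == -1:
--             break
--
--         positions.append(start + cut_position)
--         start += len(cut_site_length)
--
--     return positions
-- ===== SOURCE B (Python) =====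
-- def find_cut_sites(dna_sequence, cut_site):
--     # staged approach: split the sequence on the cleaned recognition pattern,
--     # then reconstruct the match positions as prefix sums of the fragment lengths
--     cut_position = cut_site.index('|')
--     pattern = cut_site.replace('|', '')
--     parts = dna_sequence.split(pattern)
--     positions = []
--     pos = 0
--     for part in parts[:-1]:
--         pos += len(part)
--         positions.append(pos + cut_position)
--         pos += len(pattern)
--     return positions
-- ===== Notes on version B (the rewrite author's own statement) =====
-- stated objective: alternative
-- what changed: Replaces A's repeated str.find jump loop with a staged algorithm: split the sequence on the cleaned pattern once, then reconstruct cut positions as prefix sums of the fragment lengths; Pre_ excludes cut sites without '|' (A raises ValueError) and cut sites that are all '|' (empty pattern: A loops forever, B's split('') raises).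
import Mathlib
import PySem

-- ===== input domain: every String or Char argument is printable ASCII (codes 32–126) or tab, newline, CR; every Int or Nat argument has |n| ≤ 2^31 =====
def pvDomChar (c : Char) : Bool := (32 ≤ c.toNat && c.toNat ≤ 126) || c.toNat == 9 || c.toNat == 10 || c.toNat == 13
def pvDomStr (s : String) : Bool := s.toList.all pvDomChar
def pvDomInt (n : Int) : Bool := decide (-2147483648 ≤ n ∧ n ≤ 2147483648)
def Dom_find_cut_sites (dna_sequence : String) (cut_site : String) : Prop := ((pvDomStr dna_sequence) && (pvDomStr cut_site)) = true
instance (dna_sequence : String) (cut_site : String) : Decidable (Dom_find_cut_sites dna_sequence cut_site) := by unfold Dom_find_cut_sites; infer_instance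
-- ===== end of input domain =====

-- B replaces A's repeated str.find jump loop by a staged algorithm (split on the pattern once,
-- then reconstruct positions as prefix sums of fragment lengths); proved equal on Pre_.

-- ===== PORT A =====
-- A's 'while True' loop; fuel bounds the number of iterations (each found match advances
-- start by len(pattern) ≥ 1 under Pre_, so length+1 iterations always suffice; the fuel is
-- a totality guard only, not an algorithm switch).
def fcsLoopA (s p : List Char) (cpos : Int) : Nat → Int → List Int → List Int
  | 0, _, acc => acc
  | fuel+1, start, acc =>
    let start' := PySem.Chars.findFrom s p start none
    if start' = -1 then acc
    else fcsLoopA s p cpos fuel (start' + (p.length : Int)) (acc ++ [start' + cpos])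

def find_cut_sites (dna_sequence : String) (cut_site : String) : List Int :=
  -- cut_site_length = cut_site.replace('|',''); cut_position = cut_site.index('|')
  -- (.index raises ValueError when '|' is absent; Pre_ excludes that, so find's -1 is never used)
  let pat := (PySem.Str.replace cut_site "|" "").toList
  let cut_position : Int := PySem.Str.find cut_site "|"
  fcsLoopA dna_sequence.toList pat cut_position (dna_sequence.toList.length + 1) 0 []

-- ===== PORT B =====
-- one step of Source B's for-loop over parts[:-1]: state = (pos, positions)
def fcsStep (plen cpos : Int) (st : Int × List Int) (part : List Char) : Int × List Int :=
  let pos := st.1 + (part.length : Int)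
  (pos + plen, st.2 ++ [pos + cpos])

def find_cut_sites_alt (dna_sequence : String) (cut_site : String) : List Int :=
  -- cut_position = cut_site.index('|') (ValueError excluded by Pre_, so find is exact here)
  let cut_position : Int := PySem.Str.find cut_site "|"
  let pat := (PySem.Str.replace cut_site "|" "").toList
  -- parts = dna_sequence.split(pattern); Pre_ gives pattern ≠ '' (split('') raises ValueError)
  let parts := PySem.Chars.splitOn dna_sequence.toList pat
  -- parts[:-1] on any Python list is exactly List.dropLast
  (parts.dropLast.foldl (fcsStep (pat.length : Int) cut_position) (0, [])).2

-- ===== PRECONDITION & SPEC =====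
-- Pre_ excludes exactly the inputs where A does not return: cut sites without '|'
-- (cut_site.index('|') raises ValueError) and cut sites consisting only of '|'
-- (empty search pattern: str.find always succeeds and start never advances, A loops forever).
def Pre_find_cut_sites (_dna_sequence : String) (cut_site : String) : Prop :=
  PySem.Str.isIn "|" cut_site = true ∧ PySem.Str.replace cut_site "|" "" ≠ ""
instance (dna_sequence : String) (cut_site : String) : Decidable (Pre_find_cut_sites dna_sequence cut_site) := by unfold Pre_find_cut_sites; infer_instance

def pvWitness_find_cut_sites : String × String := ("GAATTCACGAATTC", "G|AATTC")

def Spec_find_cut_sites (dna_sequence : String) (cut_site : String) (out : List Int) : Prop := out = find_cut_sites_alt dna_sequence cut_site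
instance (dna_sequence : String) (cut_site : String) (out : List Int) : Decidable (Spec_find_cut_sites dna_sequence cut_site out) := by unfold Spec_find_cut_sites; infer_instance

-- ===== CLAIM (what is proved, stated in full; the proofs are below) =====
def Claim_equal_find_cut_sites : Prop := ∀ (dna_sequence : String) (cut_site : String), Dom_find_cut_sites dna_sequence cut_site → Pre_find_cut_sites dna_sequence cut_site → Spec_find_cut_sites dna_sequence cut_site (find_cut_sites dna_sequence cut_site)

-- ===== LEMMAS AND PROOFS =====

-- splitOn.go on the exhausted string, any fuel
lemma fcs_go_nil (p cur : List Char) (acc : List (List Char)) (f : Nat) :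
    PySem.Chars.splitOn.go p f [] cur acc = (cur.reverse :: acc).reverse := by
  cases f <;> simp [PySem.Chars.splitOn.go]

-- the accumulator is only ever prepended to the final reversed result
lemma fcs_go_acc (p : List Char) :
    ∀ (fuel : Nat) (l cur : List Char) (acc : List (List Char)),
      PySem.Chars.splitOn.go p fuel l cur acc
        = acc.reverse ++ PySem.Chars.splitOn.go p fuel l cur [] := by
  intro fuel
  induction fuel with
  | zero => intro l cur acc; simp [PySem.Chars.splitOn.go]
  | succ f ih =>
    intro l cur acc
    cases l with
    | nil => simp [fcs_go_nil]
    | cons c rest =>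
      simp only [PySem.Chars.splitOn.go]
      by_cases hpre : p.isPrefixOf (c :: rest)
      · simp only [hpre, if_true]
        rw [ih _ [] (cur.reverse :: acc), ih _ [] [cur.reverse]]
        simp
      · simp only [hpre]
        exact ih rest (c :: cur) acc

-- the result does not depend on the fuel once the fuel covers the string
lemma fcs_go_fuel (p : List Char) (hp : p ≠ []) :
    ∀ (n f1 f2 : Nat) (l cur : List Char) (acc : List (List Char)),
      l.length ≤ n → l.length ≤ f1 → l.length ≤ f2 →
      PySem.Chars.splitOn.go p f1 l cur acc = PySem.Chars.splitOn.go p f2 l cur acc := by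
  intro n
  induction n with
  | zero =>
    intro f1 f2 l cur acc hn _ _
    have : l = [] := List.length_eq_zero_iff.mp (by omega)
    subst this; simp [fcs_go_nil]
  | succ n ih =>
    intro f1 f2 l cur acc hn h1 h2
    cases l with
    | nil => simp [fcs_go_nil]
    | cons c rest =>
      have hplen : 1 ≤ p.length := List.length_pos_iff.mpr hp
      simp only [List.length_cons] at hn h1 h2
      obtain ⟨g1, rfl⟩ : ∃ k, f1 = k + 1 := ⟨f1 - 1, by omega⟩
      obtain ⟨g2, rfl⟩ : ∃ k, f2 = k + 1 := ⟨f2 - 1, by omega⟩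
      simp only [PySem.Chars.splitOn.go]
      by_cases hpre : p.isPrefixOf (c :: rest)
      · simp only [hpre, if_true]
        exact ih g1 g2 _ [] _ (by simp [List.length_drop]; omega)
          (by simp [List.length_drop]; omega) (by simp [List.length_drop]; omega)
      · simp only [hpre]
        exact ih g1 g2 rest (c :: cur) acc (by omega) (by omega) (by omega)

-- no occurrence of p in l: the scan just moves l into cur, any fuel
lemma fcs_go_nomatch (p : List Char) (_hp : p ≠ []) :
    ∀ (fuel : Nat) (l cur : List Char) (acc : List (List Char)), ¬ p <:+: l →
      PySem.Chars.splitOn.go p fuel l cur acc = ((cur.reverse ++ l) :: acc).reverse := by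
  intro fuel
  induction fuel with
  | zero => intro l cur acc _; simp [PySem.Chars.splitOn.go]
  | succ f ih =>
    intro l cur acc hinf
    cases l with
    | nil => simp [fcs_go_nil]
    | cons c rest =>
      simp only [PySem.Chars.splitOn.go]
      have hpre : ¬ p.isPrefixOf (c :: rest) := by
        intro h
        exact hinf (List.isPrefixOf_iff_prefix.mp h).isInfix
      simp only [hpre]
      rw [ih rest (c :: cur) acc (fun h => hinf (h.trans (List.suffix_cons c rest).isInfix))]
      simp

-- extraction: find l p = k gives the match at k and its minimality
lemma fcs_find_spec (l p : List Char) (k : Nat) (h : PySem.Chars.find l p = (k : Int)) :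
    p <+: l.drop k ∧ ∀ j, j < k → ¬ p <+: l.drop j := by
  have hz : PySem.Chars.findFrom l p ((0 : Nat) : Int) none = (k : Int) := by
    simpa [PySem.Chars.findFrom_zero] using h
  have hne : PySem.Chars.findFrom l p ((0 : Nat) : Int) none ≠ -1 := by
    rw [hz]; omega
  obtain ⟨-, h2, h3⟩ := PySem.Chars.findFrom_natCast_spec l p 0 (Nat.zero_le _) hne
  rw [hz] at h2 h3
  refine ⟨by simpa using h2, fun j hj => h3 j (by omega) (by simpa using hj)⟩

-- uniqueness: a match at k below which there is none forces find l p = k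
lemma fcs_find_eq (l p : List Char) (hp : p ≠ []) (k : Nat)
    (hpre : p <+: l.drop k) (hmin : ∀ j, j < k → ¬ p <+: l.drop j) :
    PySem.Chars.find l p = (k : Int) := by
  have hk : k ≤ l.length := by
    by_contra hc
    have : l.drop k = [] := List.drop_eq_nil_of_le (by omega)
    rw [this] at hpre
    exact hp (List.prefix_nil.mp hpre)
  have hne : PySem.Chars.findFrom l p ((0 : Nat) : Int) none ≠ -1 := by
    rw [Ne, show ((0:Nat):Int) = (0:Int) by norm_num,
      show (0:Int) = ((0:Nat):Int) by norm_num,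
      PySem.Chars.findFrom_natCast_eq_neg_one_iff l p 0 (Nat.zero_le _)]
    intro hc
    exact hc (by simpa using (hpre.isInfix.trans (List.drop_suffix k l).isInfix))
  obtain ⟨h1, h2, h3⟩ := PySem.Chars.findFrom_natCast_spec l p 0 (Nat.zero_le _) hne
  have hz : PySem.Chars.findFrom l p ((0 : Nat) : Int) none = PySem.Chars.find l p := by
    simp [PySem.Chars.findFrom_zero]
  set r := PySem.Chars.findFrom l p ((0 : Nat) : Int) none with hr
  have h0 : 0 ≤ r := by simpa using h1
  have hle : r.toNat ≤ k := by
    by_contra hc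
    exact (h3 k (by omega) (by omega)) hpre
  have hge : k ≤ r.toNat := by
    by_contra hc
    exact (hmin r.toNat (by omega)) h2
  rw [← hz]; omega

-- splitOn of a string with no occurrence
lemma fcs_splitOn_nomatch (l p : List Char) (hp : p ≠ []) (h : ¬ p <:+: l) :
    PySem.Chars.splitOn l p = [l] := by
  simp [PySem.Chars.splitOn, fcs_go_nomatch p hp _ l [] [] h]

-- splitOn.go steps over the first match (at find l p = k), consuming k+1 fuel
lemma fcs_go_match (p : List Char) (hp : p ≠ []) :
    ∀ (k : Nat) (l cur : List Char) (acc : List (List Char)) (fuel : Nat),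
      l.length ≤ fuel → PySem.Chars.find l p = (k : Int) →
      PySem.Chars.splitOn.go p fuel l cur acc
        = PySem.Chars.splitOn.go p (fuel - (k + 1)) (l.drop (k + p.length)) []
            ((cur.reverse ++ l.take k) :: acc) := by
  intro k
  induction k with
  | zero =>
    intro l cur acc fuel hfuel hfind
    obtain ⟨hpre, -⟩ := fcs_find_spec l p 0 hfind
    simp only [List.drop_zero] at hpre
    have hl : l ≠ [] := by
      intro h; subst h; exact hp (by simpa using hpre)
    obtain ⟨c, rest, rfl⟩ := List.exists_cons_of_ne_nil hl
    obtain ⟨g, rfl⟩ : ∃ g, fuel = g + 1 := ⟨fuel - 1, by simp at hfuel; omega⟩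
    simp only [PySem.Chars.splitOn.go, List.isPrefixOf_iff_prefix.mpr hpre, if_true]
    simp
  | succ k ih =>
    intro l cur acc fuel hfuel hfind
    obtain ⟨hpre, hmin⟩ := fcs_find_spec l p (k+1) hfind
    have hl : l ≠ [] := by
      intro h; subst h
      exact hp (by simpa using hpre)
    obtain ⟨c, rest, rfl⟩ := List.exists_cons_of_ne_nil hl
    obtain ⟨g, rfl⟩ : ∃ g, fuel = g + 1 := ⟨fuel - 1, by simp at hfuel; omega⟩
    have hnpre : ¬ p.isPrefixOf (c :: rest) := by
      intro h
      exact (hmin 0 (by omega)) (by simpa using List.isPrefixOf_iff_prefix.mp h)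
    have hfind' : PySem.Chars.find rest p = (k : Int) := by
      apply fcs_find_eq rest p hp k
      · simpa [List.drop_succ_cons] using hpre
      · intro j hj
        have := hmin (j+1) (by omega)
        simpa [List.drop_succ_cons] using this
    simp only [PySem.Chars.splitOn.go, hnpre, Bool.false_eq_true, if_false]
    rw [ih rest (c :: cur) acc g (by simp at hfuel; omega) hfind']
    have hfe : g - (k + 1) = g + 1 - (k + 1 + 1) := by omega
    have hdrop : rest.drop (k + p.length) = (c :: rest).drop (k + 1 + p.length) := by
      rw [show k + 1 + p.length = (k + p.length) + 1 by omega, List.drop_succ_cons]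
    have hcur : (c :: cur).reverse ++ rest.take k = cur.reverse ++ (c :: rest).take (k + 1) := by
      simp [List.take_succ_cons]
    rw [hfe, hdrop, hcur]

-- splitOn of a string whose first occurrence of p is at k
lemma fcs_splitOn_match (l p : List Char) (hp : p ≠ []) (k : Nat)
    (h : PySem.Chars.find l p = (k : Int)) :
    PySem.Chars.splitOn l p = l.take k :: PySem.Chars.splitOn (l.drop (k + p.length)) p := by
  have hplen : 1 ≤ p.length := List.length_pos_iff.mpr hp
  obtain ⟨hpre, -⟩ := fcs_find_spec l p k h
  have hkle : k + p.length ≤ l.length := by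
    have := hpre.length_le
    simp [List.length_drop] at this
    by_cases hk : k ≤ l.length
    · omega
    · exfalso
      rw [List.drop_eq_nil_of_le (by omega)] at hpre
      exact hp (by simpa using hpre)
  unfold PySem.Chars.splitOn
  rw [fcs_go_match p hp k l [] [] (l.length + 1) (by omega) h]
  rw [fcs_go_acc]
  simp only [List.reverse_nil, List.nil_append, List.reverse_cons, List.reverse_nil,
    List.nil_append, List.singleton_append]
  congr 1
  exact fcs_go_fuel p hp ((l.drop (k + p.length)).length) _ _ _ _ _ le_rfl
    (by simp only [List.length_drop]; omega) (by simp only [List.length_drop]; omega)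

-- find = -1 means no occurrence at all
lemma fcs_find_neg_infix (l p : List Char) (h : PySem.Chars.find l p = -1) : ¬ p <:+: l := by
  have hz : PySem.Chars.findFrom l p ((0 : Nat) : Int) none = -1 := by
    simpa [PySem.Chars.findFrom_zero] using h
  have := (PySem.Chars.findFrom_natCast_eq_neg_one_iff l p 0 (Nat.zero_le _)).mp hz
  simpa using this

-- find ≥ 0 whenever it is not -1
lemma fcs_find_nonneg (l p : List Char) (h : PySem.Chars.find l p ≠ -1) :
    0 ≤ PySem.Chars.find l p := by
  have hne : PySem.Chars.findFrom l p ((0 : Nat) : Int) none ≠ -1 := by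
    simpa [PySem.Chars.findFrom_zero] using h
  obtain ⟨h1, -, -⟩ := PySem.Chars.findFrom_natCast_spec l p 0 (Nat.zero_le _) hne
  have hz : PySem.Chars.findFrom l p ((0 : Nat) : Int) none = PySem.Chars.find l p := by
    simp [PySem.Chars.findFrom_zero]
  rw [hz] at h1
  simpa using h1

-- splitOn never returns the empty list (p ≠ [])
lemma fcs_splitOn_ne_nil (l p : List Char) (hp : p ≠ []) :
    PySem.Chars.splitOn l p ≠ [] := by
  by_cases h : PySem.Chars.find l p = -1
  · rw [fcs_splitOn_nomatch l p hp (fcs_find_neg_infix l p h)]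
    simp
  · have h0 := fcs_find_nonneg l p h
    have hk : PySem.Chars.find l p = ((PySem.Chars.find l p).toNat : Int) := by omega
    rw [fcs_splitOn_match l p hp _ hk]
    simp

-- core equivalence: A's find loop from index i computes B's fold over the split of s.drop i
lemma fcs_main (s p : List Char) (cpos : Int) (hp : p ≠ []) :
    ∀ (m i fuel : Nat) (acc : List Int), i ≤ s.length → s.length - i < fuel →
      s.length - i ≤ m →
      fcsLoopA s p cpos fuel (i : Int) acc
        = (((PySem.Chars.splitOn (s.drop i) p).dropLast).foldl
            (fcsStep (p.length : Int) cpos) ((i : Int), acc)).2 := by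
  have hplen : 1 ≤ p.length := List.length_pos_iff.mpr hp
  intro m
  induction m using Nat.strong_induction_on with
  | _ m ih =>
    intro i fuel acc hi hfuel hm
    obtain ⟨f, rfl⟩ : ∃ f, fuel = f + 1 := ⟨fuel - 1, by omega⟩
    by_cases hr : PySem.Chars.find (s.drop i) p = -1
    · -- no further occurrence: A stops, splitOn gives a single part, the fold is empty
      have hff : PySem.Chars.findFrom s p ((i : Nat) : Int) none = -1 := by
        rw [PySem.Chars.findFrom_natCast s p i hi, if_pos hr]
      have hinf : ¬ p <:+: s.drop i :=
        (PySem.Chars.findFrom_natCast_eq_neg_one_iff s p i hi).mp hff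
      simp only [fcsLoopA, hff, if_true]
      rw [fcs_splitOn_nomatch _ p hp hinf]
      simp
    · -- first occurrence at i + k: A emits i+k+cpos, B's first fragment has length k
      have h0 : 0 ≤ PySem.Chars.find (s.drop i) p := fcs_find_nonneg _ p hr
      set k := (PySem.Chars.find (s.drop i) p).toNat with hkdef
      have hk : PySem.Chars.find (s.drop i) p = (k : Int) := by omega
      obtain ⟨hpre, -⟩ := fcs_find_spec (s.drop i) p k hk
      have hkle : k + p.length ≤ s.length - i := by
        have := hpre.length_le
        simp [List.length_drop] at this
        by_cases hkk : k ≤ s.length - i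
        · omega
        · exfalso
          rw [List.drop_eq_nil_of_le (by simp [List.length_drop]; omega)] at hpre
          exact hp (List.prefix_nil.mp hpre)
      have hff : PySem.Chars.findFrom s p ((i : Nat) : Int) none = (i : Int) + (k : Int) := by
        rw [PySem.Chars.findFrom_natCast s p i hi, if_neg hr, hk]
      simp only [fcsLoopA, hff]
      rw [if_neg (by omega)]
      rw [fcs_splitOn_match _ p hp k hk]
      rw [List.drop_drop]
      rw [List.dropLast_cons_of_ne_nil (fcs_splitOn_ne_nil _ p hp)]
      rw [List.foldl_cons]
      have hstep : fcsStep (p.length : Int) cpos ((i : Int), acc) ((s.drop i).take k)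
          = (((i + k + p.length : Nat) : Int), acc ++ [(i : Int) + (k : Int) + cpos]) := by
        simp only [fcsStep, List.length_take, List.length_drop]
        have : min k (s.length - i) = k := by omega
        rw [this]
        rw [Prod.mk.injEq]
        exact ⟨by push_cast; ring, rfl⟩
      rw [hstep]
      have harg : (i : Int) + (k : Int) + (p.length : Int) = ((i + k + p.length : Nat) : Int) := by
        push_cast; ring
      rw [harg]
      rw [show i + (k + p.length) = i + k + p.length from by omega]
      exact ih (s.length - (i + k + p.length)) (by omega) (i + k + p.length) f _
        (by omega) (by omega) (by omega)

-- ===== VERDICT (by name: the statement is the Claim_ definition above) =====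
theorem find_cut_sites_spec : Claim_equal_find_cut_sites := by
  intro d c _hdom hpre
  obtain ⟨-, h2⟩ := hpre
  show find_cut_sites d c = find_cut_sites_alt d c
  have hp : (PySem.Str.replace c "|" "").toList ≠ [] := by
    intro h
    apply h2
    cases hc : PySem.Str.replace c "|" "" with
    | _ => simp_all
  unfold find_cut_sites find_cut_sites_alt
  have := fcs_main d.toList (PySem.Str.replace c "|" "").toList
    (PySem.Str.find c "|") hp d.toList.length 0 (d.toList.length + 1) []
    (by omega) (by omega) (by omega)
  simpa using this
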